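-- pv_equiv track=rewrite | github.com/jamesfisk/namewizard | namer/views.py | good_style
-- ===== SOURCE A (Python) =====
-- def good_style(word):
--     if len(word) > 10 or len(word) < 3:
--         return False
--
--     word = word.lower()
--     ct = 0
--     for i in range(len(word) - 1):
--         if word[i] == word[i + 1]:
--             ct += 1
--         else:
--             ct = 0
--         if ct == 2:
--             return False
--
--     vowels = False
--     ct = 0
--     for letter in word:
--         ct += 1
--         if letter in ['a', 'e', 'i', 'o', 'u', 'y']:
--             vowels = True
--             ct = 0
--         if ct == 4:
--             return False
--
--     if vowels == False:
--         return False
--     return True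
-- ===== SOURCE B (Python) =====
-- def _runs(xs):
--     xs = list(xs)
--     if not xs:
--         return []
--     x = xs[0]
--     i = 1
--     while i < len(xs) and xs[i] == x:
--         i += 1
--     return [(x, i)] + _runs(xs[i:])
--
--
-- def good_style(word):
--     if not 3 <= len(word) <= 10:
--         return False
--     w = word.lower()
--     char_runs = _runs(w)
--     class_runs = _runs(c in 'aeiouy' for c in w)
--     return (all(n < 3 for _, n in char_runs)
--             and any(v for v, _ in class_runs)
--             and all(v or n < 4 for v, n in class_runs))
-- ===== Notes on version B (the rewrite author's own statement) =====
-- stated objective: alternative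
-- what changed: A's two stateful counting loops with early returns are replaced by a run-length-encoding pass: the word is compressed into runs of identical characters and runs of the vowel/consonant classification, and the style rules become declarative checks over the run lists (no char run >= 3, some vowel run, no consonant run >= 4).
import Mathlib
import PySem

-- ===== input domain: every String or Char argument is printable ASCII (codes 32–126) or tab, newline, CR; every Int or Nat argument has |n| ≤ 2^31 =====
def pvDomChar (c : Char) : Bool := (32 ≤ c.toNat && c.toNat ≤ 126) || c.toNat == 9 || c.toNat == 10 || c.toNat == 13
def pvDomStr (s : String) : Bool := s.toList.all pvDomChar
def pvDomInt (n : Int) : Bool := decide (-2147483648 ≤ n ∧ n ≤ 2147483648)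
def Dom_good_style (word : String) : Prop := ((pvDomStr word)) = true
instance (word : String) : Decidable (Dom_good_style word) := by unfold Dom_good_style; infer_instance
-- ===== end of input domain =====

-- B replaces A's two stateful counting loops by run-length encoding: it compresses the word
-- into runs (of identical chars and of the vowel/consonant class) and states the rules as
-- declarative checks over the run lists (alternative decomposition, same cost).

-- ===== PORT A =====
def gsVowels : List Char := ['a', 'e', 'i', 'o', 'u', 'y']

-- first loop: ct counts consecutive equal pairs, early-return False at ct == 2
def gsLoop1 : List Char → Nat → Bool
  | a :: b :: rest, ct =>
    let ct' := if a == b then ct + 1 else 0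
    if ct' == 2 then false else gsLoop1 (b :: rest) ct'
  | _, _ => true

-- second loop: ct counts letters since the last vowel, early-return False at ct == 4; returns the final vowels flag
def gsLoop2 : List Char → Nat → Bool → Bool
  | [], _, vowels => vowels
  | c :: rest, ct, vowels =>
    let st := if gsVowels.contains c then (true, (0 : Nat)) else (vowels, ct + 1)
    if st.2 == 4 then false else gsLoop2 rest st.2 st.1

def good_style (word : String) : Bool :=
  if word.toList.length > 10 || word.toList.length < 3 then false
  else
    let w := PySem.Chars.lower word.toList
    if gsLoop1 w 0 == false then false
    else gsLoop2 w 0 false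

-- ===== PORT B =====
-- _runs: the while loop counting the equal prefix is the takeWhile length; the recursive
-- call on xs[i:] is the call on dropWhile (exact transcription of Source B's _runs)
def runsL {α : Type} [DecidableEq α] : List α → List (α × Nat)
  | [] => []
  | x :: xs =>
    let i := (xs.takeWhile (fun y => y == x)).length + 1
    (x, i) :: runsL (xs.dropWhile (fun y => y == x))
termination_by l => l.length
decreasing_by
  simp only [List.length_cons]
  have := List.length_dropWhile_le (fun y => y == x) xs
  omega

def good_style_alt (word : String) : Bool :=
  if !(3 ≤ word.toList.length && word.toList.length ≤ 10) then false
  else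
    let w := PySem.Chars.lower word.toList
    let charRuns := runsL w
    let classRuns := runsL (w.map (fun c => "aeiouy".toList.contains c))
    charRuns.all (fun p => p.2 < 3) &&
      classRuns.any (fun p => p.1) &&
      classRuns.all (fun p => p.1 || p.2 < 4)

-- ===== PRECONDITION & SPEC =====
def Spec_good_style (word : String) (out : Bool) : Prop := out = good_style_alt word
instance (word : String) (out : Bool) : Decidable (Spec_good_style word out) := by unfold Spec_good_style; infer_instance

-- ===== CLAIM (what is proved, stated in full; the proofs are below) =====
def Claim_equal_good_style : Prop := ∀ (word : String), Dom_good_style word → Spec_good_style word (good_style word)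

-- ===== LEMMAS AND PROOFS =====

def vw (c : Char) : Bool := gsVowels.contains c

-- "a triple of equal adjacent chars exists"
def triS : List Char → Bool
  | a :: b :: c :: rest => (a == b && b == c) || triS (b :: c :: rest)
  | _ => false

-- "the first n entries exist and are all false"
def pre4 : Nat → List Bool → Bool
  | 0, _ => true
  | _ + 1, [] => false
  | n + 1, c :: r => !c && pre4 n r

-- "somewhere 4 consecutive entries are false"
def quadS : List Bool → Bool
  | [] => false
  | c :: rest => pre4 4 (c :: rest) || quadS rest

-- spec of A's second loop's early-return condition, k = non-vowel run so far
def badS : Nat → List Char → Bool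
  | _, [] => false
  | k, c :: rest => if vw c then badS 0 rest else (if k + 1 == 4 then true else badS (k + 1) rest)

def headEq2 : List Char → Bool
  | a :: b :: _ => a == b
  | _ => false

lemma gsLoop1_cons0 (a b : Char) (rest : List Char) :
    gsLoop1 (a :: b :: rest) 0 = if a = b then gsLoop1 (b :: rest) 1 else gsLoop1 (b :: rest) 0 := by
  by_cases h : a = b <;> simp [gsLoop1, h]

lemma gsLoop1_cons1 (a b : Char) (rest : List Char) :
    gsLoop1 (a :: b :: rest) 1 = if a = b then false else gsLoop1 (b :: rest) 0 := by
  by_cases h : a = b <;> simp [gsLoop1, h]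

lemma loop1_spec (l : List Char) :
    gsLoop1 l 0 = !triS l ∧ gsLoop1 l 1 = (if headEq2 l then false else !triS l) := by
  induction l with
  | nil => simp [gsLoop1, triS, headEq2]
  | cons x xs ih =>
    rcases xs with _ | ⟨y, ys⟩
    · simp [gsLoop1, triS, headEq2]
    · obtain ⟨ih0, ih1⟩ := ih
      constructor
      · rw [gsLoop1_cons0]
        by_cases hxy : x = y
        · rw [if_pos hxy, ih1]
          rcases ys with _ | ⟨z, zs⟩
          · simp [headEq2, triS]
          · by_cases hyz : y = z <;> simp [headEq2, triS, hxy, hyz]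
        · rw [if_neg hxy, ih0]
          rcases ys with _ | ⟨z, zs⟩ <;> simp [triS, hxy]
      · rw [gsLoop1_cons1]
        by_cases hxy : x = y
        · simp [headEq2, hxy]
        · rw [if_neg hxy, ih0]
          rcases ys with _ | ⟨z, zs⟩ <;> simp [headEq2, triS, hxy]

lemma loop2_spec (l : List Char) : ∀ k : Nat, k ≤ 3 → ∀ v : Bool,
    gsLoop2 l k v = ((v || l.any vw) && !badS k l) := by
  induction l with
  | nil => intro k hk v; simp [gsLoop2, badS]
  | cons c rest ih =>
    intro k hk v
    by_cases hc : c ∈ gsVowels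
    · simp [gsLoop2, badS, hc, vw, ih 0 (by omega)]
    · by_cases hk3 : k = 3
      · subst hk3
        simp [gsLoop2, badS, hc, vw]
      · have h4 : ¬(k + 1 = 4) := by omega
        simp [gsLoop2, badS, hc, vw, hk3, ih (k+1) (by omega)]

lemma pre4_rep_false (j n : Nat) (rest : List Bool) (hr : rest.head? ≠ some false) :
    pre4 j (List.replicate n false ++ rest) = decide (j ≤ n) := by
  induction n generalizing j with
  | zero =>
    cases j with
    | zero => simp [pre4]
    | succ j' =>
      rcases rest with _ | ⟨b, r⟩
      · simp [pre4]
      · cases b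
        · simp at hr
        · simp [pre4]
  | succ n' ih =>
    cases j with
    | zero => simp [pre4]
    | succ j' => simpa [List.replicate_succ, pre4] using ih j'

lemma quadS_rep (b : Bool) (n : Nat) (rest : List Bool) (hr : rest.head? ≠ some b) :
    quadS (List.replicate n b ++ rest) = ((!b && decide (4 ≤ n)) || quadS rest) := by
  induction n with
  | zero => simp
  | succ n' ih =>
    rw [List.replicate_succ, List.cons_append]
    cases b
    · have h3 : pre4 3 (List.replicate n' false ++ rest) = decide (3 ≤ n') :=
        pre4_rep_false 3 n' rest hr
      have h4 : pre4 4 (false :: (List.replicate n' false ++ rest)) = decide (3 ≤ n') := by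
        simp [pre4, h3]
      rw [show quadS (false :: (List.replicate n' false ++ rest))
            = (pre4 4 (false :: (List.replicate n' false ++ rest))
              || quadS (List.replicate n' false ++ rest)) from rfl, h4, ih]
      by_cases h : 3 ≤ n' <;> simp [h, show (4 ≤ n' + 1) ↔ (3 ≤ n') by omega] <;> omega
    · rw [show quadS (true :: (List.replicate n' true ++ rest))
            = (pre4 4 (true :: (List.replicate n' true ++ rest))
              || quadS (List.replicate n' true ++ rest)) from rfl]
      simp [pre4, ih]

lemma triS_rep (x : Char) (n : Nat) (rest : List Char) (hr : rest.head? ≠ some x) :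
    triS (List.replicate n x ++ rest) = (decide (3 ≤ n) || triS rest) := by
  match n with
  | 0 => simp
  | 1 =>
    rcases rest with _ | ⟨b, _ | ⟨c, r⟩⟩
    · simp [triS]
    · simp [triS]
    · have hxb : (x == b) = false := by
        simp only [List.head?] at hr
        simp only [beq_eq_false_iff_ne, ne_eq]
        intro h; exact hr (by rw [h])
      simp [triS, hxb]
  | 2 =>
    rcases rest with _ | ⟨b, r⟩
    · simp [triS]
    · have hxb : (x == b) = false := by
        simp only [List.head?] at hr
        simp only [beq_eq_false_iff_ne, ne_eq]
        intro h; exact hr (by rw [h])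
      rcases r with _ | ⟨d, r'⟩ <;> simp [triS, hxb]
  | (m + 3) =>
    have hrep : List.replicate (m + 3) x ++ rest = x :: x :: x :: (List.replicate m x ++ rest) := by
      simp [List.replicate_succ]
    rw [hrep]
    simp [triS]

-- decomposition facts for runsL's step
lemma takeWhile_eq_rep {α : Type} [DecidableEq α] (x : α) (xs : List α) :
    xs.takeWhile (fun y => y == x) = List.replicate (xs.takeWhile (fun y => y == x)).length x := by
  apply List.eq_replicate_of_mem
  intro a ha
  have := List.mem_takeWhile_imp ha
  simpa using this

lemma dropWhile_head {α : Type} [DecidableEq α] (x : α) (xs : List α) :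
    (xs.dropWhile (fun y => y == x)).head? ≠ some x := by
  intro h
  rcases hd : xs.dropWhile (fun y => y == x) with _ | ⟨a, r⟩
  · rw [hd] at h; simp at h
  · rw [hd] at h
    have := List.head?_dropWhile_not (fun y => y == x) xs
    rw [hd] at this
    simp at this h
    exact this (h ▸ rfl)

lemma runs_decomp {α : Type} [DecidableEq α] (x : α) (xs : List α) :
    x :: xs = List.replicate ((xs.takeWhile (fun y => y == x)).length + 1) x
      ++ xs.dropWhile (fun y => y == x) := by
  rw [List.replicate_succ, List.cons_append, ← takeWhile_eq_rep x xs,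
    List.takeWhile_append_dropWhile]

lemma runs_any_triS (l : List Char) :
    (runsL l).any (fun p => decide (3 ≤ p.2)) = triS l := by
  induction l using runsL.induct with
  | case1 => simp [runsL, triS]
  | case2 x xs ih =>
    rw [runsL]
    conv_rhs => rw [runs_decomp x xs]
    rw [triS_rep x _ _ (dropWhile_head x xs)]
    simp [ih]

lemma runs_any_fst {α : Type} [DecidableEq α] (f : α → Bool) (l : List α) :
    (runsL l).any (fun p => f p.1) = l.any f := by
  induction l using runsL.induct with
  | case1 => simp [runsL]
  | case2 x xs ih =>
    rw [runsL]
    conv_rhs => rw [runs_decomp x xs]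
    rw [List.any_cons, List.any_append, List.any_replicate, ih]
    cases f x <;> simp

lemma runs_any_quadS (l : List Bool) :
    (runsL l).any (fun p => !p.1 && decide (4 ≤ p.2)) = quadS l := by
  induction l using runsL.induct with
  | case1 => simp [runsL, quadS]
  | case2 x xs ih =>
    rw [runsL]
    conv_rhs => rw [runs_decomp x xs]
    rw [quadS_rep x _ _ (dropWhile_head x xs)]
    simp [ih]

lemma vowel_str : "aeiouy".toList = gsVowels := by decide

lemma pre4_mono {n m : Nat} (h : n ≤ m) {l : List Bool} (hm : pre4 m l = true) : pre4 n l = true := by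
  induction l generalizing n m with
  | nil => cases n with
    | zero => simp [pre4]
    | succ n' => cases m with
      | zero => omega
      | succ m' => simp [pre4] at hm
  | cons c r ih =>
    cases n with
    | zero => simp [pre4]
    | succ n' => cases m with
      | zero => omega
      | succ m' =>
        simp [pre4] at hm ⊢
        exact ⟨hm.1, ih (by omega) hm.2⟩

lemma pre4_quad {l : List Bool} (h : pre4 4 l = true) : quadS l = true := by
  cases l with
  | nil => simp [pre4] at h
  | cons c r => simp [quadS, h]

lemma badS_eq (l : List Char) : ∀ k : Nat, k ≤ 3 →
    badS k l = (pre4 (4 - k) (l.map vw) || quadS (l.map vw)) := by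
  induction l with
  | nil =>
    intro k hk
    obtain ⟨m, hm⟩ : ∃ m, 4 - k = m + 1 := ⟨3 - k, by omega⟩
    simp [badS, quadS, hm, pre4]
  | cons c rest ih =>
    intro k hk
    by_cases hc : vw c = true
    · have hq : quadS ((c :: rest).map vw) = quadS (rest.map vw) := by
        simp [quadS, pre4, hc]
      have hp : pre4 (4 - k) ((c :: rest).map vw) = false := by
        obtain ⟨m, hm⟩ : ∃ m, 4 - k = m + 1 := ⟨3 - k, by omega⟩
        simp [hm, pre4, hc]
      rw [show badS k (c :: rest) = badS 0 rest by simp [badS, hc]]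
      rw [ih 0 (by omega), hp, hq]
      by_cases h4 : pre4 4 (rest.map vw) = true
      · simp [h4, pre4_quad h4]
      · simp_all
    · have hcf : vw c = false := by simpa using hc
      by_cases hk3 : k = 3
      · subst hk3
        have h1 : badS 3 (c :: rest) = true := by simp [badS, hcf]
        have h2 : pre4 1 ((c :: rest).map vw) = true := by simp [pre4, hcf]
        rw [h1, show (4 : Nat) - 3 = 1 from rfl, h2]
        simp
      · have h4 : ¬(k + 1 = 4) := by omega
        have hstep : badS k (c :: rest) = badS (k + 1) rest := by
          simp [badS, hcf]
          exact fun h => absurd h hk3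
        obtain ⟨m, hm⟩ : ∃ m, 4 - k = m + 1 ∧ m = 3 - k := ⟨3 - k, by omega, rfl⟩
        rw [hstep, ih (k+1) (by omega)]
        have h41 : 4 - (k+1) = 3 - k := by omega
        rw [h41, hm.1]
        simp only [List.map_cons, pre4, hcf, Bool.not_false, Bool.true_and, hm.2]
        have hq : quadS (false :: rest.map vw)
            = (pre4 3 (rest.map vw) || quadS (rest.map vw)) := by
          simp [quadS, pre4]
        rw [hq]
        by_cases h3 : pre4 3 (rest.map vw) = true
        · have := pre4_mono (show 3 - k ≤ 3 by omega) h3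
          simp [h3, this]
        · simp_all

-- A's bad condition equals a 4-false window in the classification map
lemma badS_eq_quadS (l : List Char) : badS 0 l = quadS (l.map vw) := by
  rw [badS_eq l 0 (by omega)]
  by_cases h4 : pre4 4 (l.map vw) = true
  · simp [h4, pre4_quad h4]
  · simp_all

lemma main_eq (word : String) : good_style word = good_style_alt word := by
  unfold good_style good_style_alt
  have hguard : (word.toList.length > 10 || word.toList.length < 3)
      = !(3 ≤ word.toList.length && word.toList.length ≤ 10) := by
    by_cases h1 : word.toList.length > 10 <;> by_cases h2 : word.toList.length < 3 <;>
      simp_all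
  rw [hguard]
  by_cases hlen : (!(3 ≤ word.toList.length && word.toList.length ≤ 10)) = true
  · rw [if_pos hlen, if_pos hlen]
  · rw [if_neg hlen, if_neg hlen]
    set w := PySem.Chars.lower word.toList with hw
    have hvw : (fun c => ("aeiouy".toList).contains c) = vw := by
      funext c; rw [vowel_str]; rfl
    rw [hvw]
    have h1 := (loop1_spec w).1
    have h2 := loop2_spec w 0 (by omega) false
    have hp3 : (fun a : Char × Nat => !decide (a.2 < 3)) = (fun a => decide (3 ≤ a.2)) := by
      funext a
      by_cases h : a.2 < 3
      · simp [h, show ¬ 3 ≤ a.2 by omega]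
      · simp [h, show 3 ≤ a.2 by omega]
    have hall3 : (runsL w).all (fun p => p.2 < 3)
        = !((runsL w).any (fun p => decide (3 ≤ p.2))) := by
      rw [List.all_eq_not_any_not]
      rw [show (fun (a : Char × Nat) => !decide (a.2 < 3)) = (fun a => decide (3 ≤ a.2)) from hp3]
    have hp4 : (fun a : Bool × Nat => !(a.1 || decide (a.2 < 4)))
        = (fun a => !a.1 && decide (4 ≤ a.2)) := by
      funext a
      by_cases hp : a.1 = true <;> by_cases h : a.2 < 4 <;>
        simp [hp, h] <;> omega
    have hall4 : (runsL (w.map vw)).all (fun p => p.1 || p.2 < 4)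
        = !((runsL (w.map vw)).any (fun p => !p.1 && decide (4 ≤ p.2))) := by
      rw [List.all_eq_not_any_not]
      rw [show (fun (a : Bool × Nat) => !(a.1 || decide (a.2 < 4)))
        = (fun a => !a.1 && decide (4 ≤ a.2)) from hp4]
    have hanyid : (w.map vw).any (fun b => b) = w.any vw := by
      rw [List.any_map]
      rfl
    dsimp only
    rw [hall3, hall4, runs_any_triS, runs_any_quadS, runs_any_fst (fun b => b), hanyid,
      ← badS_eq_quadS, h1, h2]
    by_cases ht : triS w <;> by_cases ha : w.any vw <;> by_cases hb : badS 0 w <;>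
      simp [ht, ha, hb]

-- ===== VERDICT (by name: the statement is the Claim_ definition above) =====
theorem good_style_spec : Claim_equal_good_style := by
  intro word _
  unfold Spec_good_style
  exact main_eq word
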